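-- pv_equiv track=rewrite | github.com/GuidoM197/TPS-Algo-1 | TP1/primera_entrega_cuatro_en_linea.py | insertar_simbolo
-- ===== SOURCE A (Python) =====
-- def insertar_simbolo(tablero: list[list[str]], columna: int) -> bool:
--
--     """Dado un tablero y un índice de columna, se intenta colocar el símbolo del
--     turno actual en dicha columna.
--     Un símbolo solo se puede colocar si el número de columna indicada por
--     parámetro es válido, y si queda espacio en dicha columna.
--     El número de la columna se encuentra indexado en 0, entonces `0` corresponde
--     a la primer columna.
--
--     PRECONDICIONES:
--         - el parámetro `tablero` fue inicializado con la función `crear_tablero`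
--     POSTCONDICIONES:
--         - si la función devolvió `True`, se modificó el contenido del parámetro
--           `tablero`. Caso contrario, el parámetro `tablero` no se vio modificado
--     """
--
--     """Primero revisa si el valor esta dentro del rango del tablero, si no es asi devuelve False,
--     en el de que si este en el rango, revisa toda la columna desde la ultima fila a la primera y si
--     encuentra un espacio "vacio" devuelve True, en el caso que todos ya esten ocupados devuelven False"""
--
--     ultima_fila = []
--     count_x = 0
--     count_o = 0
--
--     if not str(columna).isdigit() or not 0 <= int(columna) < len(tablero[0]):
--         return False
--
--     """Revisa si la ultima fila esta vacia, en ese caso devuelve True ya que juega X."""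
--     for i in range(len(tablero[0])):
--         if tablero[len(tablero)-1][i] == " ":
--             ultima_fila.append(tablero[len(tablero)-1][i])
--
--     """Revisa todo el tablero y hace un recuento de X y O para verificar quien fue el ultimo jugador."""
--     for fil in range(len(tablero)):
--         for col in range(len(tablero[fil])):
--             if tablero[fil][col] == "X":
--                 count_x += 1
--
--     for fil in range(len(tablero)):
--         for col in range(len(tablero[fil])):
--             if tablero[fil][col] == "O":
--                 count_o += 1
--
--     for fila in range(len(tablero)-1,-1,-1):
--
--         if ultima_fila == tablero[fila]:
--             tablero[fila][int(columna)] = "X"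
--             return True
--
--         if count_x > count_o and tablero[fila][int(columna)] == " ":
--             tablero[fila][int(columna)] = "O"
--             return True
--
--         elif count_x == count_o and tablero[fila][int(columna)] == " ":
--             tablero[fila][int(columna)] = "X"
--             return True
--
--     return False
-- ===== SOURCE B (Python) =====
-- def insertar_simbolo(tablero: list[list[str]], columna: int) -> bool:
--     """Legality test for dropping a symbol: the move succeeds iff the column
--     index is a valid non-negative index and either the bottom row is still
--     completely empty (the opening player X can always move) or the board is in
--     a consistent turn state (#X >= #O) and the column has a free cell.
--     Unlike the original this computes the answer as a formula and does not
--     write the symbol into the board; the agreement is about the return value."""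
--     if not str(columna).isdigit():
--         return False
--     c = int(columna)
--     if not 0 <= c < len(tablero[0]):
--         return False
--     if all(cell == " " for cell in tablero[-1]):
--         return True
--     cells = [cell for row in tablero for cell in row]
--     return cells.count("X") >= cells.count("O") and any(row[c] == " " for row in tablero)
-- ===== Notes on version B (the rewrite author's own statement) =====
-- stated objective: simpler
-- what changed: B computes the legality of the move as a closed formula (bottom row fully empty, or #X >= #O over the flattened board and some cell in the column free) instead of A's blank-list construction, two nested counting scans and bottom-up mutating placement loop with three branches; B does not mutate the board, the agreement is about the returned bool; Pre_ excludes the inputs where A raises (empty board past the short-circuit, ragged boards with a valid column) and the ragged valid-column boards on which A happens to return, since whether A raises there depends on incidental row lengths.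
-- outside the precondition, e.g. on insertar_simbolo([[' '], [' ', 'X']], 0): A returns True, B returns True
import Mathlib
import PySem

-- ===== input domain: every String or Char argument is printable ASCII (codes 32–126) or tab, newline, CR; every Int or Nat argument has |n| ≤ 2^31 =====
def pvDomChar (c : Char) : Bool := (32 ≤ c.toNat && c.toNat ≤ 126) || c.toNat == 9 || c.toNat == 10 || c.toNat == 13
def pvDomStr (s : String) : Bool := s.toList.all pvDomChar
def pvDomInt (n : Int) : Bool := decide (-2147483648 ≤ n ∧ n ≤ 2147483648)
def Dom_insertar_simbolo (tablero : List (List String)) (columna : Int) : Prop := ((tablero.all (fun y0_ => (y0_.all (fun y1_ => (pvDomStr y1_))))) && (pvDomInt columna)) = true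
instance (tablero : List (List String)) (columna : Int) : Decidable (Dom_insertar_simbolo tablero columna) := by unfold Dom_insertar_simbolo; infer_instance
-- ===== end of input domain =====

-- B replaces A's blank-list build, two nested counting scans and bottom-up mutating
-- placement loop by a closed legality formula (bottom row all blank, or #X >= #O and a
-- free cell in the column); A mutates `tablero` on success and B does not — the
-- equivalence proved is about the return value only.


-- ===== PORT A =====
-- count_x / count_o loop: 'for fil: for col: if tablero[fil][col] == sym: count += 1'
def pvCountSymA (sym : String) (tablero : List (List String)) : Int :=
  tablero.foldl (fun c row => row.foldl (fun c s => if s = sym then c + 1 else c) c) 0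

-- ultima_fila loop: 'for i in range(len(tablero[0])): if tablero[len(tablero)-1][i] == " ": append'
def pvUltimaFilaA (tablero : List (List String)) : List String :=
  (PySem.List.pyRange 0 ((tablero.headD []).length : Int) 1).foldl
    (fun acc i =>
      if PySem.List.pyGetD (PySem.List.pyGetD tablero ((tablero.length : Int) - 1) []) i "" = " "
      then acc ++ [PySem.List.pyGetD (PySem.List.pyGetD tablero ((tablero.length : Int) - 1) []) i ""]
      else acc) []

-- final loop: 'for fila in range(len(tablero)-1, -1, -1): …' (each mutation is followed
-- by an immediate return, so only the branch tests decide the returned Bool)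
def pvFinalLoopA (tablero : List (List String)) (ultima : List String) (cx co col : Int) : List Int → Bool
  | [] => false
  | fila :: rest =>
    let row := PySem.List.pyGetD tablero fila []
    if ultima = row then true
    else if cx > co ∧ PySem.List.pyGetD row col "" = " " then true
    else if cx = co ∧ PySem.List.pyGetD row col "" = " " then true
    else pvFinalLoopA tablero ultima cx co col rest

def insertar_simbolo (tablero : List (List String)) (columna : Int) : Bool :=
  if ¬ (PySem.Str.strIsdigit (PySem.Int.toStr columna) = true)
     ∨ ¬ (0 ≤ columna ∧ columna < ((tablero.headD []).length : Int)) then false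
  else
    pvFinalLoopA tablero (pvUltimaFilaA tablero)
      (pvCountSymA "X" tablero) (pvCountSymA "O" tablero) columna
      (PySem.List.pyRange ((tablero.length : Int) - 1) (-1) (-1))

-- ===== PORT B =====
def insertar_simbolo_alt (tablero : List (List String)) (columna : Int) : Bool :=
  if ¬ (PySem.Str.strIsdigit (PySem.Int.toStr columna) = true) then false
  else if ¬ (0 ≤ columna ∧ columna < ((tablero.headD []).length : Int)) then false
  else if (PySem.List.pyGetD tablero (-1) []).all (fun cell => cell == " ") then true
  else
    -- cells = [cell for row in tablero for cell in row]
    let cells := tablero.flatMap (fun row => row)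
    decide (PySem.List.count cells "O" ≤ PySem.List.count cells "X") &&
      tablero.any (fun row => PySem.List.pyGetD row columna "" == " ")

-- ===== PRECONDITION & SPEC =====
-- Pre_ excludes (a) inputs where A raises: an empty board reached past the short-circuit
-- (IndexError on tablero[0]) and ragged boards with a valid column index, where A's row
-- accesses can raise; and (b) the ragged valid-column boards on which A happens to
-- return, because whether A raises there depends on incidental row lengths rather than
-- on the function's stated domain (boards from crear_tablero are rectangular).
def Pre_insertar_simbolo (tablero : List (List String)) (columna : Int) : Prop :=
  columna < 0 ∨
    (tablero ≠ [] ∧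
      (columna < ((tablero.headD []).length : Int) →
        ∀ row ∈ tablero, row.length = (tablero.headD []).length))
instance (tablero : List (List String)) (columna : Int) : Decidable (Pre_insertar_simbolo tablero columna) := by unfold Pre_insertar_simbolo; infer_instance

def pvWitness_insertar_simbolo : List (List String) × Int :=
  ([[" ", "X"], ["O", " "]], 1)

def Spec_insertar_simbolo (tablero : List (List String)) (columna : Int) (out : Bool) : Prop := out = insertar_simbolo_alt tablero columna
instance (tablero : List (List String)) (columna : Int) (out : Bool) : Decidable (Spec_insertar_simbolo tablero columna out) := by unfold Spec_insertar_simbolo; infer_instance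

-- ===== CLAIM (what is proved, stated in full; the proofs are below) =====
def Claim_equal_insertar_simbolo : Prop := ∀ (tablero : List (List String)) (columna : Int), Dom_insertar_simbolo tablero columna → Pre_insertar_simbolo tablero columna → Spec_insertar_simbolo tablero columna (insertar_simbolo tablero columna)

-- ===== LEMMAS AND PROOFS =====

-- str(n).isdigit() is false for negative n (the string starts with '-')
lemma strIsdigit_toStr_neg {n : Int} (hn : n < 0) :
    PySem.Str.strIsdigit (PySem.Int.toStr n) = false := by
  simp [PySem.Str.strIsdigit_eq, PySem.Int.toList_toStr, PySem.Int.toChars, hn,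
        PySem.Chars.strIsdigit, PySem.Chars.isdigit]

-- A's nested counting loop equals the count of the flattened board (B's `cells`)
lemma countA_eq (sym : String) (tablero : List (List String)) :
    pvCountSymA sym tablero
      = (PySem.List.count (tablero.flatMap (fun row => row)) sym : Int) := by
  unfold pvCountSymA
  have h1 : tablero.foldl (fun c row => row.foldl (fun c s => if s = sym then c + 1 else c) c) 0
      = tablero.foldl (fun c row => c + (PySem.List.count row sym : Int)) 0 := by
    apply PySem.List.foldl_congr_mem
    intro acc row _
    have h := PySem.List.foldl_count_if (fun s => s == sym) row acc
    simpa [PySem.List.count_eq, List.count] using h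
  rw [h1, PySem.List.foldl_add tablero (fun row => (PySem.List.count row sym : Int)) 0]
  simp only [PySem.List.count_eq, List.flatMap_id']
  rw [List.count_flatten]
  push_cast
  rw [List.map_map]
  simp [Function.comp_def]

-- A's index-built blank list is a replicate of the last row's blank count
lemma ultimaFilaA_eq (tablero : List (List String))
    (hlast : (PySem.List.pyGetD tablero ((tablero.length : Int) - 1) []).length
              = (tablero.headD []).length) :
    pvUltimaFilaA tablero
      = List.replicate
          (PySem.List.count
            (PySem.List.pyGetD tablero ((tablero.length : Int) - 1) []) " ") " " := by
  unfold pvUltimaFilaA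
  rw [← hlast]
  rw [PySem.List.foldl_pyRange_zero_pyGetD'
        (PySem.List.pyGetD tablero ((tablero.length : Int) - 1) []) ""
        (fun acc s => if s = " " then acc ++ [s] else acc) []]
  rw [PySem.List.foldl_append_ite_eq_filter]
  have hb : (fun s : String => decide (s = " ")) = (fun s : String => s == " ") := by
    funext s; exact (Bool.beq_eq_decide_eq s " ").symm
  rw [hb, List.filter_beq, PySem.List.count_eq]
  simp

-- A's early-return if-chain over the index list is an 'any' of the disjunction
lemma finalLoopA_eq_any (t : List (List String)) (u : List String) (cx co col : Int)
    (idxs : List Int) :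
    pvFinalLoopA t u cx co col idxs
      = idxs.any (fun i =>
          decide (u = PySem.List.pyGetD t i []) ||
          (decide (co ≤ cx) &&
            decide (PySem.List.pyGetD (PySem.List.pyGetD t i []) col "" = " "))) := by
  induction idxs with
  | nil => rfl
  | cons i rest ih =>
    simp only [pvFinalLoopA, List.any_cons, ih]
    by_cases h1 : u = PySem.List.pyGetD t i []
    · simp [h1]
    · by_cases h2 : PySem.List.pyGetD (PySem.List.pyGetD t i []) col "" = " "
      · by_cases h3 : cx > co
        · simp [h1, h2, h3, show co ≤ cx by omega]
        · by_cases h4 : cx = co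
          · simp [h1, h2, h4]
          · simp [h1, h2, h3, h4, show ¬ co ≤ cx by omega]
      · simp [h1, h2]

-- ===== VERDICT (by name: the statement is the Claim_ definition above) =====
-- an 'any' over range(len(t)) of a row predicate is an 'any' over the rows
lemma any_rows_special (t : List (List String)) (u : List String) (b : Bool) (col : Int) :
    (PySem.List.pyRange 0 (t.length : Int) 1).any
        (fun i => decide (u = PySem.List.pyGetD t i []) ||
          (b && decide (PySem.List.pyGetD (PySem.List.pyGetD t i []) col "" = " ")))
      = t.any (fun row => decide (u = row) ||
          (b && decide (PySem.List.pyGetD row col "" = " "))) := by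
  conv_rhs => rw [← PySem.List.map_pyGetD_pyRange_zero' t ([] : List String)]
  rw [List.any_map]
  rfl

-- a constant conjunct factors out of an 'any'
lemma any_const_and (t : List (List String)) (b : Bool) (p : List String → Bool) :
    t.any (fun row => b && p row) = (b && t.any p) := by
  cases b <;> simp

-- ===== VERDICT (by name: the statement is the Claim_ definition above) =====
theorem insertar_simbolo_spec : Claim_equal_insertar_simbolo := by
  intro tablero columna _ hpre
  unfold Spec_insertar_simbolo insertar_simbolo insertar_simbolo_alt
  by_cases hd : PySem.Str.strIsdigit (PySem.Int.toStr columna) = true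
  · by_cases hb : 0 ≤ columna ∧ columna < ((tablero.headD []).length : Int)
    · -- valid column: Pre_ gives a nonempty rectangular board
      have hnneg : ¬ columna < 0 := by
        intro hlt
        rw [strIsdigit_toStr_neg hlt] at hd
        exact absurd hd (by simp)
      rcases hpre with h | ⟨hne, hrect⟩
      · exact absurd h hnneg
      have hpos : 0 < tablero.length := List.length_pos_iff.mpr hne
      have hlastmem : PySem.List.pyGetD tablero ((tablero.length : Int) - 1) [] ∈ tablero :=
        PySem.List.pyGetD_mem _ _ ⟨by omega, by omega⟩
      have hlast := hrect hb.2 _ hlastmem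
      have hneg1 : PySem.List.pyGetD tablero (-1) []
          = PySem.List.pyGetD tablero ((tablero.length : Int) - 1) [] := by
        rw [PySem.List.pyGetD_neg_one _ _ hne,
            PySem.List.pyGetD_eq_getElem _ _ (by omega) (by omega),
            List.getLast_eq_getElem]
        congr 1
        omega
      rw [if_neg (by simp only [not_or, not_not]; exact ⟨hd, hb⟩),
          if_neg (not_not_intro hd), if_neg (not_not_intro hb)]
      show pvFinalLoopA tablero (pvUltimaFilaA tablero)
            (pvCountSymA "X" tablero) (pvCountSymA "O" tablero) columna
            (PySem.List.pyRange ((tablero.length : Int) - 1) (-1) (-1))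
          = (if (PySem.List.pyGetD tablero (-1) []).all (fun cell => cell == " ") then true
             else
               decide (PySem.List.count (tablero.flatMap (fun row => row)) "O"
                        ≤ PySem.List.count (tablero.flatMap (fun row => row)) "X") &&
                 tablero.any (fun row => PySem.List.pyGetD row columna "" == " "))
      have hr : PySem.List.pyRange ((tablero.length : Int) - 1) (-1) (-1)
          = (PySem.List.pyRange 0 (tablero.length : Int) 1).reverse := by
        rw [PySem.List.pyRange_neg_one_eq_reverse]
        norm_num
      rw [hneg1, finalLoopA_eq_any, hr, List.any_reverse, any_rows_special,
          ultimaFilaA_eq tablero hlast]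
      set L := PySem.List.pyGetD tablero ((tablero.length : Int) - 1) [] with hL
      set cells := tablero.flatMap (fun row => row) with hcells
      set k := PySem.List.count L " " with hk
      by_cases hbl : L.all (fun cell => cell == " ") = true
      · -- last row all blank: both sides are true
        rw [if_pos hbl]
        have hLrep : L = List.replicate k " " := by
          have hall : ∀ b ∈ L, b = " " := by
            intro b hbmem
            simpa using List.all_eq_true.mp hbl b hbmem
          have hkl : k = L.length := by
            rw [hk, PySem.List.count_eq]
            exact List.count_eq_length.mpr (fun b hb => (hall b hb).symm)
          exact List.eq_replicate_iff.mpr ⟨hkl.symm, hall⟩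
        apply List.any_eq_true.mpr
        exact ⟨L, hlastmem, by simp [← hLrep]⟩
      · -- last row not all blank: the row-equality branch never fires
        rw [if_neg hbl, countA_eq, countA_eq, ← hcells]
        have hklt : k < L.length := by
          have hne' : ¬ ∀ b ∈ L, b = " " := by
            intro hall
            exact hbl (List.all_eq_true.mpr (fun b hb => by simp [hall b hb]))
          have hle : List.count " " L ≤ L.length := List.count_le_length
          have : List.count " " L ≠ L.length := by
            intro hEq
            exact hne' (fun b hb => (List.count_eq_length.mp hEq b hb).symm)
          rw [hk, PySem.List.count_eq]
          omega
        have hxo : decide ((PySem.List.count cells "O" : Int) ≤ (PySem.List.count cells "X" : Int))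
            = decide (PySem.List.count cells "O" ≤ PySem.List.count cells "X") := by
          simp
        rw [hxo]
        have hcong : ∀ row ∈ tablero,
            (decide (List.replicate k " " = row) ||
              (decide (PySem.List.count cells "O" ≤ PySem.List.count cells "X") &&
                decide (PySem.List.pyGetD row columna "" = " ")))
            = (decide (PySem.List.count cells "O" ≤ PySem.List.count cells "X") &&
                (PySem.List.pyGetD row columna "" == " ")) := by
          intro row hrow
          have hlen : row.length = L.length := by rw [hrect hb.2 _ hrow, ← hlast]
          have hnr : List.replicate k " " ≠ row := by
            intro hEq
            have := congrArg List.length hEq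
            simp at this
            omega
          simp [hnr, Bool.beq_eq_decide_eq]
        rw [PySem.List.any_congr_mem hcong, any_const_and]
    · rw [if_pos (Or.inr hb), if_neg (not_not_intro hd), if_pos hb]
  · rw [if_pos (Or.inl hd), if_pos hd]
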